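-- pv_equiv track=rewrite | github.com/briangu/klongpy | tests/utils.py | _expr_uses_nested_arrays
-- ===== SOURCE A (Python) =====
-- def _expr_uses_nested_arrays(expr_str):
--     """Check if an expression uses nested/jagged arrays."""
--     # Look for patterns like [1 [2] 3] or [[1 2] [3 4 5]]
--     # This is a heuristic - nested brackets with different content
--     bracket_depth = 0
--     max_depth = 0
--     for c in expr_str:
--         if c == '[':
--             bracket_depth += 1
--             max_depth = max(max_depth, bracket_depth)
--         elif c == ']':
--             bracket_depth -= 1
--     return max_depth > 1
-- ===== SOURCE B (Python) =====
-- def _expr_uses_nested_arrays(expr_str):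
--     """Check if an expression uses nested/jagged arrays."""
--     # Positional characterization instead of depth tracking: nesting occurs
--     # iff some '[' opens while an earlier bracket is still unclosed, i.e. the
--     # prefix before it contains strictly more '[' than ']'.
--     return any(c == '[' and expr_str.count('[', 0, i) > expr_str.count(']', 0, i)
--                for i, c in enumerate(expr_str))
-- ===== Notes on version B (the rewrite author's own statement) =====
-- stated objective: alternative
-- what changed: Replaces A's single fused loop that updates a running bracket_depth and max_depth with a positional existence test: for each '[' it recounts the '[' and ']' occurrences in the prefix before it and returns whether any '[' opens inside a still-unclosed bracket; no depth counter or running maximum is maintained.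
import Mathlib
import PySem

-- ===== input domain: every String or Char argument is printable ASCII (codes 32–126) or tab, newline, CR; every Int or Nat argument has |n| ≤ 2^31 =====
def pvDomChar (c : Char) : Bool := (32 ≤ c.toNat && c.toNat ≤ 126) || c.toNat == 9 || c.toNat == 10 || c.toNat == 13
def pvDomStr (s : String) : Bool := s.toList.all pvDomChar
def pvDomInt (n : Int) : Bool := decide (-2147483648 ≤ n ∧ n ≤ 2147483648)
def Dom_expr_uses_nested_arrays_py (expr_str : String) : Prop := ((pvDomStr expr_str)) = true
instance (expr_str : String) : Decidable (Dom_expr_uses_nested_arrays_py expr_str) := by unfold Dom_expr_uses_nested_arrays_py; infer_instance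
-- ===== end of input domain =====

-- B replaces A's running-depth/max loop with a positional existence test (recount '['/']'
-- in the prefix before each '['); alternative algorithm.

-- ===== PORT A =====
def expr_uses_nested_arrays_py (expr_str : String) : Bool :=
  let st := expr_str.toList.foldl (fun (st : Int × Int) c =>
    if c = '[' then (st.1 + 1, max st.2 (st.1 + 1))
    else if c = ']' then (st.1 - 1, st.2)
    else st) (0, 0)
  decide (st.2 > 1)

-- ===== PORT B =====
-- any(c == '[' and expr_str.count('[', 0, i) > expr_str.count(']', 0, i) for i, c in enumerate(expr_str));
-- str.count('[', 0, i) of a single char = count of that char in the first i characters (i = ic.1 ≥ 0 here,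
-- so .toNat is exact).
def expr_uses_nested_arrays_py_alt (expr_str : String) : Bool :=
  (PySem.List.enumerate expr_str.toList).any (fun ic =>
    ic.2 == '[' &&
      decide ((expr_str.toList.take ic.1.toNat).count '[' > (expr_str.toList.take ic.1.toNat).count ']'))

-- ===== PRECONDITION & SPEC =====
def Spec_expr_uses_nested_arrays_py (expr_str : String) (out : Bool) : Prop := out = expr_uses_nested_arrays_py_alt expr_str
instance (expr_str : String) (out : Bool) : Decidable (Spec_expr_uses_nested_arrays_py expr_str out) := by unfold Spec_expr_uses_nested_arrays_py; infer_instance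

-- ===== CLAIM (what is proved, stated in full; the proofs are below) =====
def Claim_equal_expr_uses_nested_arrays_py : Prop := ∀ (expr_str : String), Dom_expr_uses_nested_arrays_py expr_str → Spec_expr_uses_nested_arrays_py expr_str (expr_uses_nested_arrays_py expr_str)

-- ===== LEMMAS AND PROOFS =====

-- signed '[' minus ']' count of a prefix
def pvDiff (t : List Char) : Int := (t.count '[' : Int) - (t.count ']' : Int)

-- "some '[' at position i has positive signed prefix count when started at depth d"
def pvP (l : List Char) (d : Int) : Prop :=
  ∃ i < l.length, l[i]? = some '[' ∧ d + pvDiff (l.take i) > 0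

theorem pvP_cons (c : Char) (l : List Char) (d : Int) :
    pvP (c :: l) d ↔ ((c = '[' ∧ d > 0) ∨
      pvP l (d + ((if c = '[' then (1 : Int) else 0) - (if c = ']' then 1 else 0)))) := by
  constructor
  · rintro ⟨i, hi, hget, hpos⟩
    cases i with
    | zero =>
      left
      simp only [List.getElem?_cons_zero, Option.some.injEq] at hget
      simp only [List.take_zero, pvDiff, List.count_nil] at hpos
      exact ⟨hget, by omega⟩
    | succ j =>
      right
      refine ⟨j, by simpa using hi, by simpa using hget, ?_⟩
      simp only [List.take_succ_cons, pvDiff, List.count_cons] at hpos ⊢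
      by_cases h1 : c = '[' <;> by_cases h2 : c = ']' <;>
        simp [h1, h2] at hpos ⊢ <;> omega
  · rintro (⟨hc, hd⟩ | ⟨j, hj, hget, hpos⟩)
    · exact ⟨0, by simp, by simp [hc], by simp [pvDiff]; omega⟩
    · refine ⟨j + 1, by simpa using hj, by simpa using hget, ?_⟩
      simp only [List.take_succ_cons, pvDiff, List.count_cons] at hpos ⊢
      by_cases h1 : c = '[' <;> by_cases h2 : c = ']' <;>
        simp [h1, h2] at hpos ⊢ <;> omega

theorem pv_fold_a (l : List Char) : ∀ d m : Int,
    ((l.foldl (fun (st : Int × Int) c =>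
      if c = '[' then (st.1 + 1, max st.2 (st.1 + 1))
      else if c = ']' then (st.1 - 1, st.2)
      else st) (d, m)).2 > 1) ↔ (m > 1 ∨ pvP l d) := by
  induction l with
  | nil => intro d m; simp [pvP]
  | cons c l ih =>
    intro d m
    rw [pvP_cons]
    by_cases h1 : c = '['
    · subst h1
      simp only [List.foldl_cons, reduceIte, ih]
      rw [show max m (d + 1) > 1 ↔ (m > 1 ∨ d > 0) from by omega]
      have e2 : d + ((1 : Int) - if ('[' : Char) = ']' then 1 else 0) = d + 1 := by
        rw [if_neg (show ¬('[' : Char) = ']' by decide)]; ring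
      rw [e2]
      tauto
    · by_cases h2 : c = ']'
      · subst h2
        simp only [List.foldl_cons, if_neg h1, reduceIte, ih]
        rw [show d + ((0 : Int) - 1) = d - 1 from by ring]
        have hne : ¬(']' : Char) = '[' := h1
        tauto
      · simp only [List.foldl_cons, if_neg h1, if_neg h2, ih]
        rw [show d + ((0 : Int) - 0) = d from by ring]
        tauto

theorem pv_alt_iff (s : String) :
    expr_uses_nested_arrays_py_alt s = true ↔ pvP s.toList 0 := by
  unfold expr_uses_nested_arrays_py_alt
  rw [List.any_eq_true]
  constructor
  · rintro ⟨ic, hmem, hp⟩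
    rw [PySem.List.mem_enumerate_iff] at hmem
    obtain ⟨k, hk, rfl⟩ := hmem
    simp only [Bool.and_eq_true, beq_iff_eq, decide_eq_true_eq] at hp
    have hn : ((0 : Int) + k).toNat = k := by omega
    rw [hn] at hp
    refine ⟨k, hk, ?_, ?_⟩
    · rw [List.getElem?_eq_getElem hk, hp.1]
    · have := hp.2
      simp only [pvDiff]
      omega
  · rintro ⟨i, hi, hget, hpos⟩
    have hc : s.toList[i] = '[' := by
      have := List.getElem?_eq_getElem hi
      rw [this] at hget; exact Option.some.inj hget
    refine ⟨((0 : Int) + i, s.toList[i]), ?_, ?_⟩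
    · rw [PySem.List.mem_enumerate_iff]; exact ⟨i, hi, rfl⟩
    · have hn : ((0 : Int) + i).toNat = i := by omega
      simp only [hn, hc, beq_self_eq_true, Bool.true_and, decide_eq_true_eq]
      simp only [pvDiff] at hpos
      omega

-- ===== VERDICT (by name: the statement is the Claim_ definition above) =====
theorem expr_uses_nested_arrays_py_spec : Claim_equal_expr_uses_nested_arrays_py := by
  intro s _
  show expr_uses_nested_arrays_py s = expr_uses_nested_arrays_py_alt s
  have hA : expr_uses_nested_arrays_py s = true ↔ pvP s.toList 0 := by
    unfold expr_uses_nested_arrays_py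
    simp only [decide_eq_true_eq]
    rw [pv_fold_a s.toList 0 0]
    simp
  exact Bool.coe_iff_coe.mp (hA.trans (pv_alt_iff s).symm)
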